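-- pv_equiv track=rewrite | github.com/miliar/Code_Jam_Webscraper | solutions_python/Problem_155/3428.py | num_claqueurs
-- ===== SOURCE A (Python) =====
-- def num_claqueurs(shyness_list, max_shyness):
-- 	curr_shyness = 0
-- 	curr_people = 0
-- 	curr_claqueurs = 0
-- 	while curr_shyness < max_shyness + 1:
-- 		if curr_people < curr_shyness:
-- 			added_claqueurs = curr_shyness-curr_people
-- 			curr_claqueurs += added_claqueurs
-- 			curr_people += added_claqueurs
-- 		curr_people += shyness_list[curr_shyness]
-- 		curr_shyness += 1
-- 	return curr_claqueurs
-- ===== SOURCE B (Python) =====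
-- def num_claqueurs(shyness_list, max_shyness):
--     prefix = [0]
--     for s in range(max_shyness + 1):
--         prefix.append(prefix[-1] + shyness_list[s])
--     return max([0] + [s - prefix[s] for s in range(max_shyness + 1)])
-- ===== Notes on version B (the rewrite author's own statement) =====
-- stated objective: alternative
-- what changed: Replaces A's running simulation (topping up a combined people+claqueurs count inside one while loop) by building an explicit prefix-sum table of the real audience and then taking the maximum deficit max(0, max_s (s - prefix[s])) in a separate pass.
import Mathlib
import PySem

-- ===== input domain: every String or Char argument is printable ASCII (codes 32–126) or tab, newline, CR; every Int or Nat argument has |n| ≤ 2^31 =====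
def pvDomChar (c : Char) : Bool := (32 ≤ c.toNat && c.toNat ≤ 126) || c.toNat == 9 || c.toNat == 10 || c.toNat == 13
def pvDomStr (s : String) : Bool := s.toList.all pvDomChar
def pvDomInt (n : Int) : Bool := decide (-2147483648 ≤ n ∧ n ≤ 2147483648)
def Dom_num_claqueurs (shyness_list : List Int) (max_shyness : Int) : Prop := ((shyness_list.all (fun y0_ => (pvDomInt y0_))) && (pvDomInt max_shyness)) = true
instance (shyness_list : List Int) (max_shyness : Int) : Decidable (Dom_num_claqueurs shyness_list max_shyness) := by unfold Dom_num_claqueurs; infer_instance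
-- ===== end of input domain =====

-- B replaces A's running top-up simulation by an explicit prefix-sum table and a
-- separate max-deficit pass (objective: alternative decomposition, same O(n) cost).

-- ===== PORT A =====
-- A's while loop over curr_shyness = 0 .. max_shyness, state (curr_people, curr_claqueurs).
def num_claqueurs (shyness_list : List Int) (max_shyness : Int) : Int :=
  ((PySem.List.pyRange 0 (max_shyness + 1) 1).foldl
    (fun (st : Int × Int) s =>
      let st' := if st.1 < s then (st.1 + (s - st.1), st.2 + (s - st.1)) else st
      (st'.1 + PySem.List.pyGetD shyness_list s 0, st'.2))
    (0, 0)).2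

-- ===== PORT B =====
-- B builds the prefix-sum list (prefix[-1] via pyGetD at -1), then takes
-- max([0] + [s - prefix[s] for s in range(max_shyness+1)]).
def num_claqueurs_alt (shyness_list : List Int) (max_shyness : Int) : Int :=
  let pfx := (PySem.List.pyRange 0 (max_shyness + 1) 1).foldl
    (fun acc s => acc ++ [PySem.List.pyGetD acc (-1) 0 + PySem.List.pyGetD shyness_list s 0])
    [0]
  ((PySem.List.max?
      ((0 : Int) :: (PySem.List.pyRange 0 (max_shyness + 1) 1).map
        (fun s => s - PySem.List.pyGetD pfx s 0))
      (fun y => y)).getD 0)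

-- ===== PRECONDITION & SPEC =====
-- Pre_ excludes max_shyness ≥ len(shyness_list), where Python A raises IndexError.
def Pre_num_claqueurs (shyness_list : List Int) (max_shyness : Int) : Prop :=
  max_shyness < (shyness_list.length : Int)
instance (shyness_list : List Int) (max_shyness : Int) : Decidable (Pre_num_claqueurs shyness_list max_shyness) := by unfold Pre_num_claqueurs; infer_instance

def pvWitness_num_claqueurs : List Int × Int := ([1, 0, 2], 2)

def Spec_num_claqueurs (shyness_list : List Int) (max_shyness : Int) (out : Int) : Prop := out = num_claqueurs_alt shyness_list max_shyness
instance (shyness_list : List Int) (max_shyness : Int) (out : Int) : Decidable (Spec_num_claqueurs shyness_list max_shyness out) := by unfold Spec_num_claqueurs; infer_instance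

-- ===== CLAIM (what is proved, stated in full; the proofs are below) =====
def Claim_equal_num_claqueurs : Prop := ∀ (shyness_list : List Int) (max_shyness : Int), Dom_num_claqueurs shyness_list max_shyness → Pre_num_claqueurs shyness_list max_shyness → Spec_num_claqueurs shyness_list max_shyness (num_claqueurs shyness_list max_shyness)

-- ===== LEMMAS AND PROOFS =====

-- prefix sums of shyness values and the running max of deficits, as recursive functions
def pvPref (xs : List Int) : Nat → Int
  | 0 => 0
  | k + 1 => pvPref xs k + xs.getD k 0

def pvCmax (xs : List Int) : Nat → Int
  | 0 => 0
  | k + 1 => max (pvCmax xs k) ((k : Int) - pvPref xs k)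

-- A's loop invariant: state after the first n iterations
theorem pvA_inv (xs : List Int) (n : Nat) :
    (PySem.List.pyRange 0 (n : Int) 1).foldl
      (fun (st : Int × Int) s =>
        let st' := if st.1 < s then (st.1 + (s - st.1), st.2 + (s - st.1)) else st
        (st'.1 + PySem.List.pyGetD xs s 0, st'.2))
      (0, 0)
    = (pvPref xs n + pvCmax xs n, pvCmax xs n) := by
  induction n with
  | zero => simp [PySem.List.pyRange_one_eq_nil, pvPref, pvCmax]
  | succ k ih =>
    have h : PySem.List.pyRange 0 ((k : Int) + 1) 1
        = PySem.List.pyRange 0 (k : Int) 1 ++ [(k : Int)] :=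
      PySem.List.pyRange_one_succ_right (by positivity)
    push_cast
    rw [h, List.foldl_append, ih]
    simp only [List.foldl_cons, List.foldl_nil, PySem.List.pyGetD_natCast]
    split_ifs with hc <;>
      simp only [pvPref, pvCmax, Prod.mk.injEq] <;> constructor <;> omega

-- B's first loop builds exactly the prefix-sum table [pvPref 0, …, pvPref n]
theorem pvB_pfx (xs : List Int) (n : Nat) :
    (PySem.List.pyRange 0 (n : Int) 1).foldl
      (fun acc s => acc ++ [PySem.List.pyGetD acc (-1) 0 + PySem.List.pyGetD xs s 0])
      [0]
    = (List.range (n + 1)).map (pvPref xs) := by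
  induction n with
  | zero => simp [PySem.List.pyRange_one_eq_nil, pvPref]
  | succ k ih =>
    have h : PySem.List.pyRange 0 ((k : Int) + 1) 1
        = PySem.List.pyRange 0 (k : Int) 1 ++ [(k : Int)] :=
      PySem.List.pyRange_one_succ_right (by positivity)
    push_cast
    rw [h, List.foldl_append, ih]
    have hlast : PySem.List.pyGetD ((List.range (k + 1)).map (pvPref xs)) (-1) 0
        = pvPref xs k := by
      rw [List.range_succ, List.map_append]
      exact PySem.List.pyGetD_neg_one_append_singleton _ _ _
    simp only [List.foldl_cons, List.foldl_nil]
    rw [hlast]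
    rw [List.range_succ (n := k + 1), List.map_append]
    simp [pvPref]

-- looking a prefix up in the table gives pvPref
theorem pvB_pfx_get (xs : List Int) (n k : Nat) (hk : k ≤ n) :
    PySem.List.pyGetD ((List.range (n + 1)).map (pvPref xs)) (k : Int) 0
      = pvPref xs k := by
  rw [PySem.List.pyGetD_natCast]
  rw [List.getD_eq_getElem?_getD, List.getElem?_map, List.getElem?_range (by omega)]
  rfl

-- B's second pass computes pvCmax
theorem pvB_max (xs : List Int) (n : Nat) :
    ((PySem.List.pyRange 0 (n : Int) 1).map
        (fun s => s - PySem.List.pyGetD ((List.range (n + 1)).map (pvPref xs)) s 0)).foldl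
      max 0 = pvCmax xs n := by
  -- strengthen: the table may be longer than the range scanned
  suffices H : ∀ m : Nat, m ≤ n →
      ((PySem.List.pyRange 0 (m : Int) 1).map
          (fun s => s - PySem.List.pyGetD ((List.range (n + 1)).map (pvPref xs)) s 0)).foldl
        max 0 = pvCmax xs m from H n le_rfl
  intro m hm
  induction m with
  | zero => simp [PySem.List.pyRange_one_eq_nil, pvCmax]
  | succ k ih =>
    have h : PySem.List.pyRange 0 ((k : Int) + 1) 1
        = PySem.List.pyRange 0 (k : Int) 1 ++ [(k : Int)] :=
      PySem.List.pyRange_one_succ_right (by positivity)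
    push_cast
    rw [h, List.map_append, List.foldl_append, ih (by omega)]
    simp only [List.map, List.foldl_cons, List.foldl_nil, pvCmax]
    rw [pvB_pfx_get xs n k (by omega)]

-- the two ports agree everywhere (Pre_ is only needed for faithfulness to Python)
theorem pvAgree (xs : List Int) (m : Int) :
    num_claqueurs xs m = num_claqueurs_alt xs m := by
  unfold num_claqueurs num_claqueurs_alt
  by_cases hneg : m + 1 ≤ 0
  · rw [PySem.List.pyRange_one_eq_nil hneg]
    simp [PySem.List.max?]
  · have h0 : (0 : Int) ≤ m + 1 := by omega
    obtain ⟨n, hn⟩ : ∃ n : Nat, m + 1 = (n : Int) := ⟨(m + 1).toNat, by omega⟩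
    rw [hn, pvA_inv xs n, pvB_pfx xs n]
    dsimp only
    rw [PySem.List.max?_id_cons, Option.getD_some]
    exact (pvB_max xs n).symm

-- ===== VERDICT (by name: the statement is the Claim_ definition above) =====
theorem num_claqueurs_spec : Claim_equal_num_claqueurs := by
  intro xs m _ _
  unfold Spec_num_claqueurs
  exact pvAgree xs m
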